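-- pv_equiv track=rewrite | github.com/DNYoussef/spek-v2-rebuild | analyzer/streaming/dashboard_reporter.py | _calculate_violation_severity
-- ===== SOURCE A (Python) =====
-- from typing import Any, Dict, List, Optional, Union, Tuple, Callable, Set
--
-- def _calculate_violation_severity(violation_breakdown: Dict[str, int]) -> Dict[str, int]:
--     """Calculate violation severity distribution."""
--     # Simple severity mapping based on violation type names
--     severity_counts = {"low": 0, "medium": 0, "high": 0, "critical": 0}
--
--     severity_mapping = {
--         "timing": "high",
--         "position": "medium",
--         "algorithm": "high",
--         "god_object": "critical",
--         "magic_literal": "low",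
--         "execution": "critical",
--         "values": "medium"
--     }
--
--     for violation_type, count in violation_breakdown.items():
--         severity = severity_mapping.get(violation_type, "medium")
--         severity_counts[severity] += count
--
--     return severity_counts
-- ===== SOURCE B (Python) =====
-- def _calculate_violation_severity(violation_breakdown):
--     """Calculate violation severity distribution."""
--     items = violation_breakdown.items()
--     total = sum(violation_breakdown.values())
--     high = sum(c for t, c in items if t in ("timing", "algorithm"))
--     critical = sum(c for t, c in items if t in ("god_object", "execution"))
--     low = sum(c for t, c in items if t == "magic_literal")
--     return {"low": low, "medium": total - high - critical - low,
--             "high": high, "critical": critical}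
-- ===== Notes on version B (the rewrite author's own statement) =====
-- stated objective: simpler
-- what changed: Replaces the mapping-dict dispatch loop that increments a mutable counts dict with three direct filtered sums over the hardcoded keys (high, critical, low) plus one total, computing medium as the complement total - high - critical - low, so no severity mapping or mutable accumulator dict is needed.
import Mathlib
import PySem

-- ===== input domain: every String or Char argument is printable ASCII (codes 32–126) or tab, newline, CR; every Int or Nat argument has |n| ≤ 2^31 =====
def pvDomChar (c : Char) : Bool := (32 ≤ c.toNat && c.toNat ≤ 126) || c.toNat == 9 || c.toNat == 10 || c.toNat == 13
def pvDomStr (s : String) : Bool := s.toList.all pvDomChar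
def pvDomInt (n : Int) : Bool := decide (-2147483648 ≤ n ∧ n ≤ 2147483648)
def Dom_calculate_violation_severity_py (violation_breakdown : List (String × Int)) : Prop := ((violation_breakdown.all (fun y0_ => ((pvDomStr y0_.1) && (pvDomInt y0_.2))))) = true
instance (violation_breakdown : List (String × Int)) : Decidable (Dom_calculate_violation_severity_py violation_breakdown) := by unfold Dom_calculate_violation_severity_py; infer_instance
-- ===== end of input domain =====

-- B sums each named severity bucket directly and computes medium as the complement of the total,
-- instead of A's per-item dispatch through a severity-mapping dict into a mutable counts dict (objective: simpler).

-- ===== PORT A =====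
def pvSevMapping : PySem.Dict String String := PySem.Dict.ofList
  [("timing", "high"), ("position", "medium"), ("algorithm", "high"),
   ("god_object", "critical"), ("magic_literal", "low"), ("execution", "critical"),
   ("values", "medium")]

def calculate_violation_severity_py (violation_breakdown : List (String × Int)) : List (String × Int) :=
  let init : PySem.Dict String Int := PySem.Dict.ofList [("low", 0), ("medium", 0), ("high", 0), ("critical", 0)]
  -- severity_counts[severity] += count : the key is always present, so 'modify … 0 (· + count)' is exact
  (violation_breakdown.foldl
    (fun counts p => counts.modify (pvSevMapping.getD p.1 "medium") 0 (· + p.2)) init).items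

-- ===== PORT B =====
def calculate_violation_severity_py_alt (violation_breakdown : List (String × Int)) : List (String × Int) :=
  let total := (violation_breakdown.map Prod.snd).sum
  let high := ((violation_breakdown.filter (fun p => p.1 == "timing" || p.1 == "algorithm")).map Prod.snd).sum
  let critical := ((violation_breakdown.filter (fun p => p.1 == "god_object" || p.1 == "execution")).map Prod.snd).sum
  let low := ((violation_breakdown.filter (fun p => p.1 == "magic_literal")).map Prod.snd).sum
  [("low", low), ("medium", total - high - critical - low), ("high", high), ("critical", critical)]

-- ===== PRECONDITION & SPEC =====
def Spec_calculate_violation_severity_py (violation_breakdown : List (String × Int)) (out : List (String × Int)) : Prop := out = calculate_violation_severity_py_alt violation_breakdown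
instance (violation_breakdown : List (String × Int)) (out : List (String × Int)) : Decidable (Spec_calculate_violation_severity_py violation_breakdown out) := by unfold Spec_calculate_violation_severity_py; infer_instance

-- ===== CLAIM (what is proved, stated in full; the proofs are below) =====
def Claim_equal_calculate_violation_severity_py : Prop := ∀ (violation_breakdown : List (String × Int)), Dom_calculate_violation_severity_py violation_breakdown → Spec_calculate_violation_severity_py violation_breakdown (calculate_violation_severity_py violation_breakdown)

-- ===== LEMMAS AND PROOFS =====

-- the severity A assigns to a key, characterised by plain equalities on the key
theorem pvSev_eq (k : String) :
    pvSevMapping.getD k "medium" =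
      if k = "timing" ∨ k = "algorithm" then "high"
      else if k = "god_object" ∨ k = "execution" then "critical"
      else if k = "magic_literal" then "low" else "medium" := by
  have hm : pvSevMapping = PySem.Dict.mk
      [("timing", "high"), ("position", "medium"), ("algorithm", "high"),
       ("god_object", "critical"), ("magic_literal", "low"), ("execution", "critical"),
       ("values", "medium")] := by rfl
  rw [hm]
  by_cases h1 : k = "timing"
  · subst h1; decide
  by_cases h2 : k = "algorithm"
  · subst h2; decide
  by_cases h3 : k = "god_object"
  · subst h3; decide
  by_cases h4 : k = "execution"
  · subst h4; decide
  by_cases h5 : k = "magic_literal"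
  · subst h5; decide
  by_cases h6 : k = "position"
  · subst h6; decide
  by_cases h7 : k = "values"
  · subst h7; decide
  have e1 : ("timing" == k) = false := by simp; exact fun h => h1 h.symm
  have e2 : ("algorithm" == k) = false := by simp; exact fun h => h2 h.symm
  have e3 : ("god_object" == k) = false := by simp; exact fun h => h3 h.symm
  have e4 : ("execution" == k) = false := by simp; exact fun h => h4 h.symm
  have e5 : ("magic_literal" == k) = false := by simp; exact fun h => h5 h.symm
  have e6 : ("position" == k) = false := by simp; exact fun h => h6 h.symm
  have e7 : ("values" == k) = false := by simp; exact fun h => h7 h.symm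
  simp [PySem.Dict.getD, PySem.Dict.get?_mk_cons, PySem.Dict.get?, e1, e2, e3, e4, e5, e6, e7, h1, h2, h3, h4, h5]

-- the fold of A over any prefix, with the four counters generalized
theorem pvFold_items (vb : List (String × Int)) (l m h c : Int) :
    (vb.foldl (fun counts p => counts.modify (pvSevMapping.getD p.1 "medium") 0 (· + p.2))
      (PySem.Dict.mk [("low", l), ("medium", m), ("high", h), ("critical", c)])).items =
    [("low", l + ((vb.filter (fun p => p.1 == "magic_literal")).map Prod.snd).sum),
     ("medium", m + (vb.map Prod.snd).sum
        - ((vb.filter (fun p => p.1 == "timing" || p.1 == "algorithm")).map Prod.snd).sum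
        - ((vb.filter (fun p => p.1 == "god_object" || p.1 == "execution")).map Prod.snd).sum
        - ((vb.filter (fun p => p.1 == "magic_literal")).map Prod.snd).sum),
     ("high", h + ((vb.filter (fun p => p.1 == "timing" || p.1 == "algorithm")).map Prod.snd).sum),
     ("critical", c + ((vb.filter (fun p => p.1 == "god_object" || p.1 == "execution")).map Prod.snd).sum)] := by
  induction vb generalizing l m h c with
  | nil => simp
  | cons p t ih =>
    simp only [List.foldl_cons, pvSev_eq p.1]
    split_ifs with h1 h2 h3
    · have : (PySem.Dict.mk [("low", l), ("medium", m), ("high", h), ("critical", c)]).modify "high" 0 (· + p.2)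
          = PySem.Dict.mk [("low", l), ("medium", m), ("high", h + p.2), ("critical", c)] := by rfl
      rw [this, ih]
      have hp : (p.1 == "timing" || p.1 == "algorithm") = true := by
        rcases h1 with h1 | h1 <;> simp [h1]
      have hp2 : (p.1 == "god_object" || p.1 == "execution") = false := by
        rcases h1 with h1 | h1 <;> simp [h1]
      have hp3 : (p.1 == "magic_literal") = false := by
        rcases h1 with h1 | h1 <;> simp [h1]
      simp [hp, hp2, hp3]; constructor <;> ring
    · have : (PySem.Dict.mk [("low", l), ("medium", m), ("high", h), ("critical", c)]).modify "critical" 0 (· + p.2)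
          = PySem.Dict.mk [("low", l), ("medium", m), ("high", h), ("critical", c + p.2)] := by rfl
      rw [this, ih]
      have hp : (p.1 == "timing" || p.1 == "algorithm") = false := by
        push Not at h1; simp [h1.1, h1.2]
      have hp2 : (p.1 == "god_object" || p.1 == "execution") = true := by
        rcases h2 with h2 | h2 <;> simp [h2]
      have hp3 : (p.1 == "magic_literal") = false := by
        rcases h2 with h2 | h2 <;> simp [h2]
      simp [hp, hp2, hp3]; constructor <;> ring
    · have : (PySem.Dict.mk [("low", l), ("medium", m), ("high", h), ("critical", c)]).modify "low" 0 (· + p.2)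
          = PySem.Dict.mk [("low", l + p.2), ("medium", m), ("high", h), ("critical", c)] := by rfl
      rw [this, ih]
      have hp : (p.1 == "timing" || p.1 == "algorithm") = false := by
        push Not at h1; simp [h1.1, h1.2]
      have hp2 : (p.1 == "god_object" || p.1 == "execution") = false := by
        push Not at h2; simp [h2.1, h2.2]
      have hp3 : (p.1 == "magic_literal") = true := by simp [h3]
      simp [hp, hp2, hp3]; constructor <;> ring
    · have : (PySem.Dict.mk [("low", l), ("medium", m), ("high", h), ("critical", c)]).modify "medium" 0 (· + p.2)
          = PySem.Dict.mk [("low", l), ("medium", m + p.2), ("high", h), ("critical", c)] := by rfl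
      rw [this, ih]
      have hp : (p.1 == "timing" || p.1 == "algorithm") = false := by
        push Not at h1; simp [h1.1, h1.2]
      have hp2 : (p.1 == "god_object" || p.1 == "execution") = false := by
        push Not at h2; simp [h2.1, h2.2]
      have hp3 : (p.1 == "magic_literal") = false := by simp [h3]
      simp [hp, hp2, hp3]; ring

-- ===== VERDICT (by name: the statement is the Claim_ definition above) =====
theorem calculate_violation_severity_py_spec : Claim_equal_calculate_violation_severity_py := by
  intro vb _
  show calculate_violation_severity_py vb = calculate_violation_severity_py_alt vb
  unfold calculate_violation_severity_py calculate_violation_severity_py_alt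
  have hi : PySem.Dict.ofList [("low", (0:Int)), ("medium", 0), ("high", 0), ("critical", 0)]
      = PySem.Dict.mk [("low", 0), ("medium", 0), ("high", 0), ("critical", 0)] := by rfl
  rw [hi, pvFold_items]
  simp
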